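-- pv_equiv track=rewrite | github.com/med13foundation/artana-evidence-platform | tests/conftest.py | to_async_database_url
-- ===== SOURCE A (Python) =====
-- def to_async_database_url(sync_url: str) -> str:
--     replacements = (
--         ("postgresql+psycopg2://", "postgresql+asyncpg://"),
--         ("postgresql+psycopg://", "postgresql+asyncpg://"),
--         ("postgresql://", "postgresql+asyncpg://"),
--     )
--     for prefix, replacement in replacements:
--         if sync_url.startswith(prefix):
--             return sync_url.replace(prefix, replacement, 1)
--     return sync_url
-- ===== SOURCE B (Python) =====
-- def to_async_database_url(sync_url: str) -> str:
--     mapping = {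
--         "postgresql+psycopg2": "postgresql+asyncpg",
--         "postgresql+psycopg": "postgresql+asyncpg",
--         "postgresql": "postgresql+asyncpg",
--     }
--     i = sync_url.find("://")
--     if i == -1:
--         return sync_url
--     scheme = sync_url[:i]
--     replacement = mapping.get(scheme)
--     if replacement is None:
--         return sync_url
--     return replacement + sync_url[i:]
-- ===== Notes on version B (the rewrite author's own statement) =====
-- stated objective: idiomatic
-- what changed: Replaces the ordered startswith-prefix loop + replace(...,1) with a single find of the scheme separator, an exact dict lookup of the scheme, and a rebuild of the URL from the mapped scheme and the tail.
import Mathlib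
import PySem

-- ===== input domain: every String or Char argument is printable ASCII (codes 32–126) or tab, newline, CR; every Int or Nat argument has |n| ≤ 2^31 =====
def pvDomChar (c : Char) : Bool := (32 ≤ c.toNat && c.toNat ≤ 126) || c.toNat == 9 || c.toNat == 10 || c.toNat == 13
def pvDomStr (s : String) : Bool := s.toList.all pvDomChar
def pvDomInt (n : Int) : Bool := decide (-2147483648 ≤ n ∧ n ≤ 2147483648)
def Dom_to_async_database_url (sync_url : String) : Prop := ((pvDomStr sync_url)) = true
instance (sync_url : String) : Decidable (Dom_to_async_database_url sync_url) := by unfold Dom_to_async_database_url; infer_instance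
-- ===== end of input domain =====

-- B rewrites the DB URL with one find of "://" plus an exact dict lookup of the scheme, instead of A's ordered startswith-prefix loop; objective: idiomatic.

-- ===== PORT A =====
-- hand port of s.replace(old, new, 1): replaces the FIRST occurrence only (exact for count = 1;
-- old = "" inserts new in front, as in Python)
def pyReplace1 (s old new : List Char) : List Char :=
  let j := PySem.Chars.find s old
  if j = -1 then s
  else s.take j.toNat ++ new ++ s.drop (j.toNat + old.length)

def to_async_go (sync_url : String) : List (String × String) → String
  | [] => sync_url
  | (pfx, replacement) :: rest =>
      if PySem.Str.startswith sync_url pfx then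
        String.ofList (pyReplace1 sync_url.toList pfx.toList replacement.toList)
      else to_async_go sync_url rest

def to_async_database_url (sync_url : String) : String :=
  to_async_go sync_url
    [("postgresql+psycopg2://", "postgresql+asyncpg://"),
     ("postgresql+psycopg://", "postgresql+asyncpg://"),
     ("postgresql://", "postgresql+asyncpg://")]

-- ===== PORT B =====
def asyncMapping : PySem.Dict String String :=
  PySem.Dict.ofList
    [("postgresql+psycopg2", "postgresql+asyncpg"),
     ("postgresql+psycopg", "postgresql+asyncpg"),
     ("postgresql", "postgresql+asyncpg")]

def to_async_database_url_alt (sync_url : String) : String :=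
  let i := PySem.Str.find sync_url "://"
  if i = -1 then sync_url
  else
    let scheme := PySem.Str.slice sync_url none (some i)
    match asyncMapping.get? scheme with
    | none => sync_url
    | some replacement => replacement ++ PySem.Str.slice sync_url (some i) none

-- ===== PRECONDITION & SPEC =====
def Spec_to_async_database_url (sync_url : String) (out : String) : Prop := out = to_async_database_url_alt sync_url
instance (sync_url : String) (out : String) : Decidable (Spec_to_async_database_url sync_url out) := by unfold Spec_to_async_database_url; infer_instance

-- ===== CLAIM (what is proved, stated in full; the proofs are below) =====
def Claim_equal_to_async_database_url : Prop := ∀ (sync_url : String), Dom_to_async_database_url sync_url → Spec_to_async_database_url sync_url (to_async_database_url sync_url)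

-- ===== LEMMAS AND PROOFS =====

lemma find_of_prefix {s p : List Char} (h : p <+: s) : PySem.Chars.find s p = 0 := by
  have h0 : 0 ≤ PySem.Chars.find s p := (PySem.Chars.find_nonneg_iff s p).mpr h.isInfix
  obtain ⟨hp, hmin⟩ := PySem.Chars.find_spec h0
  by_contra hne
  have hpos : 0 < (PySem.Chars.find s p).toNat := by omega
  exact hmin 0 hpos (by simpa using h)

lemma find_sep_at (sep q t : List Char)
    (h : ∀ i, i < q.length → ((q ++ sep).drop i).take sep.length ≠ sep) :
    PySem.Chars.find ((q ++ sep) ++ t) sep = (q.length : Int) := by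
  set s := (q ++ sep) ++ t with hs
  have hdropq : s.drop q.length = sep ++ t := by
    rw [hs, List.append_assoc, List.drop_append_of_le_length (by simp)]
    simp
  have hpre : sep <+: s.drop q.length := by rw [hdropq]; exact List.prefix_append sep t
  have h0 : 0 ≤ PySem.Chars.find s sep := by
    refine (PySem.Chars.find_nonneg_iff s sep).mpr ⟨q, t, by simp [hs]⟩
  obtain ⟨hp, hmin⟩ := PySem.Chars.find_spec h0
  have hne : ¬ (PySem.Chars.find s sep).toNat < q.length := by
    intro hlt
    have hdi : s.drop (PySem.Chars.find s sep).toNat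
        = (q ++ sep).drop (PySem.Chars.find s sep).toNat ++ t :=
      List.drop_append_of_le_length (by simp; omega)
    have hlen : sep.length ≤ ((q ++ sep).drop (PySem.Chars.find s sep).toNat).length := by
      simp; omega
    have := List.prefix_iff_eq_take.mp hp
    rw [hdi, List.take_append_of_le_length hlen] at this
    exact h _ hlt this.symm
  have hle : (PySem.Chars.find s sep).toNat ≤ q.length := by
    by_contra hgt
    exact hmin q.length (by omega) hpre
  omega

lemma prefix_of_take_sep {s key sep : List Char} {n : ℕ}
    (ht : s.take n = key) (hd : sep <+: s.drop n) : key ++ sep <+: s := by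
  obtain ⟨u, hu⟩ := hd
  refine ⟨u, ?_⟩
  calc key ++ sep ++ u = s.take n ++ (sep ++ u) := by rw [ht, List.append_assoc]
    _ = s.take n ++ s.drop n := by rw [hu]
    _ = s := List.take_append_drop n s

lemma asyncMapping_eq : asyncMapping = PySem.Dict.mk
    [("postgresql+psycopg2", "postgresql+asyncpg"),
     ("postgresql+psycopg", "postgresql+asyncpg"),
     ("postgresql", "postgresql+asyncpg")] := by decide

lemma mapping_get?_none {x : String} (h1 : x ≠ "postgresql+psycopg2")
    (h2 : x ≠ "postgresql+psycopg") (h3 : x ≠ "postgresql") :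
    asyncMapping.get? x = none := by
  rw [asyncMapping_eq]
  simp [Ne.symm h1, Ne.symm h2, Ne.symm h3, PySem.Dict.get?]

-- B's value when s = scheme ++ "://" ++ t and scheme is a mapped key
lemma alt_matched (s : String) (t : List Char) (scheme : String)
    (hs : s.toList = (scheme.toList ++ "://".toList) ++ t)
    (hnowin : ∀ i, i < scheme.toList.length →
        ((scheme.toList ++ "://".toList).drop i).take 3 ≠ "://".toList)
    (hget : asyncMapping.get? scheme = some "postgresql+asyncpg") :
    (to_async_database_url_alt s).toList
      = "postgresql+asyncpg".toList ++ ("://".toList ++ t) := by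
  have hfind : PySem.Str.find s "://" = (scheme.toList.length : Int) := by
    have := find_sep_at "://".toList scheme.toList t (by simpa using hnowin)
    simpa [hs] using this
  have hne : PySem.Str.find s "://" ≠ -1 := by rw [hfind]; omega
  have hscheme : PySem.Str.slice s none (some (PySem.Str.find s "://")) = scheme := by
    apply String.ext
    rw [PySem.Str.toList_slice, hfind]
    have : PySem.Chars.slice s.toList none (some (scheme.toList.length : Int))
        = s.toList.take scheme.toList.length := by
      simp [PySem.Chars.slice_eq_listSlice, PySem.List.slice_to_natCast]
    rw [this, hs, List.take_append_of_le_length (by simp),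
        List.take_append_of_le_length (by simp), List.take_length]
  have hdrop : (PySem.Str.slice s (some (PySem.Str.find s "://")) none).toList = "://".toList ++ t := by
    rw [PySem.Str.toList_slice, hfind]
    have : PySem.Chars.slice s.toList (some (scheme.toList.length : Int)) none
        = s.toList.drop scheme.toList.length := by
      simp [PySem.Chars.slice_eq_listSlice, PySem.List.slice_from_natCast]
    rw [this, hs, List.append_assoc, List.drop_append_of_le_length (by simp), List.drop_length]
    simp
  simp only [to_async_database_url_alt]
  rw [if_neg (by simpa using hne), hscheme, hget]
  rw [show (("postgresql+asyncpg" : String) ++ PySem.Str.slice s (some (PySem.Str.find s "://")) none).toList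
        = "postgresql+asyncpg".toList ++ (PySem.Str.slice s (some (PySem.Str.find s "://")) none).toList by simp,
      hdrop]

-- A's value when s starts with pfx: the replacement glued onto the tail
lemma a_matched (s : String) (pfx replacement : String) (t : List Char)
    (ht : pfx.toList ++ t = s.toList) :
    (String.ofList (pyReplace1 s.toList pfx.toList replacement.toList)).toList
      = replacement.toList ++ t := by
  have hf : PySem.Chars.find s.toList pfx.toList = 0 := find_of_prefix ⟨t, ht⟩
  simp only [pyReplace1, hf]
  rw [if_neg (by omega)]
  have hdrop : s.toList.drop pfx.length = t := by
    have h' : s.toList.drop pfx.toList.length = t := by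
      rw [← ht, List.drop_append_of_le_length (le_refl _), List.drop_length, List.nil_append]
    simpa using h'
  simp [hdrop]

theorem to_async_database_url_spec : Claim_equal_to_async_database_url := by
  intro s _
  unfold Spec_to_async_database_url
  by_cases h1 : PySem.Str.startswith s "postgresql+psycopg2://" = true
  case pos =>
    obtain ⟨t, ht⟩ := (PySem.Chars.startswith_iff s.toList "postgresql+psycopg2://".toList).mp
      (by simpa using h1)
    apply String.ext
    rw [alt_matched s t "postgresql+psycopg2" (by rw [← ht]; simp) (by decide) (by decide)]
    simp only [to_async_database_url, to_async_go, h1, if_true]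
    rw [a_matched s _ _ t ht]
    simp
  case neg =>
  by_cases h2 : PySem.Str.startswith s "postgresql+psycopg://" = true
  case pos =>
    obtain ⟨t, ht⟩ := (PySem.Chars.startswith_iff s.toList "postgresql+psycopg://".toList).mp
      (by simpa using h2)
    apply String.ext
    rw [alt_matched s t "postgresql+psycopg" (by rw [← ht]; simp) (by decide) (by decide)]
    simp only [to_async_database_url, to_async_go, h1, h2, if_true, if_false, Bool.false_eq_true]
    rw [a_matched s _ _ t ht]
    simp
  case neg =>
  by_cases h3 : PySem.Str.startswith s "postgresql://" = true
  case pos =>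
    obtain ⟨t, ht⟩ := (PySem.Chars.startswith_iff s.toList "postgresql://".toList).mp
      (by simpa using h3)
    apply String.ext
    rw [alt_matched s t "postgresql" (by rw [← ht]; simp) (by decide) (by decide)]
    simp only [to_async_database_url, to_async_go, h1, h2, h3, if_true, if_false, Bool.false_eq_true]
    rw [a_matched s _ _ t ht]
    simp
  case neg =>
    have hA : to_async_database_url s = s := by
      simp only [to_async_database_url, to_async_go, h1, h2, h3, if_false, Bool.false_eq_true]
    rw [hA]
    by_cases hf : PySem.Str.find s "://" = -1
    case pos =>
      simp only [to_async_database_url_alt]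
      rw [if_pos hf]
    case neg =>
      have h0 : 0 ≤ PySem.Str.find s "://" := by
        have := PySem.Chars.neg_one_le_find s.toList "://".toList
        simp only [PySem.Str.find] at hf ⊢
        omega
      have h0' : 0 ≤ PySem.Chars.find s.toList "://".toList := by
        rw [← PySem.Str.find_eq]; exact h0
      have hspec := PySem.Chars.find_spec (s := s.toList) (sub := "://".toList) h0'
      have hsch : (PySem.Str.slice s none (some (PySem.Str.find s "://"))).toList
          = s.toList.take (PySem.Str.find s "://").toNat := by
        rw [PySem.Str.toList_slice, PySem.Str.find_eq]
        simp only [PySem.Chars.slice_eq_listSlice]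
        exact PySem.List.slice_to s.toList h0'
      have hkey : ∀ (key pfx : String), key.toList ++ "://".toList = pfx.toList →
          ¬ PySem.Str.startswith s pfx = true →
          PySem.Str.slice s none (some (PySem.Str.find s "://")) ≠ key := by
        intro key pfx hkp hsw heq
        replace heq := congrArg String.toList heq
        rw [hsch] at heq
        have hpre : key.toList ++ "://".toList <+: s.toList := by
          refine prefix_of_take_sep ?_ hspec.1
          rw [PySem.Str.find_eq] at heq
          exact heq
        apply hsw
        rw [PySem.Str.startswith_eq]
        exact (PySem.Chars.startswith_iff _ _).mpr (hkp ▸ hpre)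
      have hnone : asyncMapping.get? (PySem.Str.slice s none (some (PySem.Str.find s "://"))) = none := by
        apply mapping_get?_none
        · exact hkey _ "postgresql+psycopg2://" (by decide) h1
        · exact hkey _ "postgresql+psycopg://" (by decide) h2
        · exact hkey _ "postgresql://" (by decide) h3
      simp only [to_async_database_url_alt]
      rw [if_neg hf, hnone]
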